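-- pv_equiv track=rewrite | github.com/pypi-data/pypi-mirror-402 | packages/rubric-kit/rubric_kit-0.1.5.tar.gz/rubric_kit-0.1.5/rubric_kit/output.py | _order_fieldnames
-- ===== SOURCE A (Python) =====
-- from typing import List, Dict, Any, Tuple
--
-- PRIORITY_FIELDS = ["criterion_name", "category", "dimension", "criterion_text", "result", "score", "max_score", "reason"]
--
-- def _order_fieldnames(fieldnames: List[str]) -> List[str]:
--     """Order fieldnames with priority fields first, judge fields last."""
--     fieldnames_set = set(fieldnames)
--     judge_fields = [f for f in fieldnames if f.startswith("judge_")]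
--     other_fields = [f for f in fieldnames if f not in PRIORITY_FIELDS and not f.startswith("judge_")]
--
--     ordered = [f for f in PRIORITY_FIELDS if f in fieldnames_set]
--     ordered.extend(sorted(other_fields))
--     ordered.extend(sorted(judge_fields))
--
--     return ordered
-- ===== SOURCE B (Python) =====
-- PRIORITY_FIELDS = ["criterion_name", "category", "dimension", "criterion_text", "result", "score", "max_score", "reason"]
--
-- def _order_fieldnames(fieldnames):
--     """Order fieldnames with priority fields first, judge fields last.
--
--     Decorate-sort-undecorate: each field gets a numeric rank (its index in
--     PRIORITY_FIELDS; non-priority fields rank after all priorities, judge_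
--     fields after those), one sort of the (rank, name) pairs produces the
--     whole ordering, then the names are extracted."""
--     num_priority = len(PRIORITY_FIELDS)
--     keyed = []
--     seen = set()
--     for f in fieldnames:
--         if f in PRIORITY_FIELDS:
--             if f not in seen:
--                 seen.add(f)
--                 keyed.append((PRIORITY_FIELDS.index(f), f))
--         elif f.startswith("judge_"):
--             keyed.append((num_priority + 1, f))
--         else:
--             keyed.append((num_priority, f))
--     keyed.sort()
--     return [f for _, f in keyed]
-- ===== Notes on version B (the rewrite author's own statement) =====
-- stated objective: alternative
-- what changed: Replaced A's three filter passes plus two separate sorts by a decorate-sort-undecorate scheme: one classifying pass tags each field with a numeric rank (priority index / others / judge), a single sort of the (rank, name) pairs then yields the entire ordering at once.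
import Mathlib
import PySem

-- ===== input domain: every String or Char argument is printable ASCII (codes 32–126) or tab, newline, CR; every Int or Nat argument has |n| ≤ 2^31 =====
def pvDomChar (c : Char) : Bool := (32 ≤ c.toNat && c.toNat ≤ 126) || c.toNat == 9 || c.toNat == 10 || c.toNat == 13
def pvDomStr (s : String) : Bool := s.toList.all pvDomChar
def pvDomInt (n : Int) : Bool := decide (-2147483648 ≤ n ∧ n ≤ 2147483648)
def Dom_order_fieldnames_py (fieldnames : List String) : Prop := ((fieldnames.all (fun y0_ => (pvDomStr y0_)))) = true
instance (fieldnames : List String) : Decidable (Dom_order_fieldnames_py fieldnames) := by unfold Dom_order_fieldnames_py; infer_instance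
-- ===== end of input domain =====

-- B replaces A's three filter passes plus two separate sorts by decorate-sort-undecorate: one
-- classifying pass tags each field with a numeric rank and ONE sort of the (rank, name) pairs
-- yields the whole ordering (objective: alternative; same asymptotic cost).

-- module constant PRIORITY_FIELDS (shared by both programs)
def priorityFields : List String :=
  ["criterion_name", "category", "dimension", "criterion_text", "result", "score", "max_score", "reason"]

-- ===== PORT A =====
def order_fieldnames_py (fieldnames : List String) : List String :=
  let fieldnamesSet : PySem.Set String := PySem.Set.ofList fieldnames
  let judgeFields := fieldnames.filter (fun f => PySem.Str.startswith f "judge_")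
  let otherFields := fieldnames.filter
    (fun f => !(priorityFields.contains f) && !(PySem.Str.startswith f "judge_"))
  let ordered := priorityFields.filter (fun f => PySem.Set.contains fieldnamesSet f)
  ordered ++ PySem.List.sorted otherFields (fun x => x) false
          ++ PySem.List.sorted judgeFields (fun x => x) false

-- ===== PORT B =====
-- PRIORITY_FIELDS.index(f) (in Source B it is guarded by 'f in PRIORITY_FIELDS', so index? is some)
def pvRankOf (f : String) : Int := (((PySem.List.index? priorityFields f).getD 0 : Nat) : Int)

-- the classifying pass of Source B: state = (keyed, seen)
def pvDecorStep (acc : List (Int × String) × PySem.Set String) (f : String) :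
    List (Int × String) × PySem.Set String :=
  if priorityFields.contains f then
    if PySem.Set.contains acc.2 f then acc
    else (acc.1 ++ [(pvRankOf f, f)], PySem.Set.add acc.2 f)
  else if PySem.Str.startswith f "judge_" then
    (acc.1 ++ [(PySem.List.len priorityFields + 1, f)], acc.2)
  else
    (acc.1 ++ [(PySem.List.len priorityFields, f)], acc.2)

def order_fieldnames_py_alt (fieldnames : List String) : List String :=
  let keyed := (fieldnames.foldl pvDecorStep ([], PySem.Set.ofList [])).1
  -- keyed.sort(): Python's tuple sort = sort by the lexicographic (rank, name) key
  (PySem.List.sorted2 keyed Prod.fst Prod.snd false).map Prod.snd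

-- ===== PRECONDITION & SPEC =====
def Spec_order_fieldnames_py (fieldnames : List String) (out : List String) : Prop := out = order_fieldnames_py_alt fieldnames
instance (fieldnames : List String) (out : List String) : Decidable (Spec_order_fieldnames_py fieldnames out) := by unfold Spec_order_fieldnames_py; infer_instance

-- ===== CLAIM (what is proved, stated in full; the proofs are below) =====
def Claim_equal_order_fieldnames_py : Prop := ∀ (fieldnames : List String), Dom_order_fieldnames_py fieldnames → Spec_order_fieldnames_py fieldnames (order_fieldnames_py fieldnames)

-- ===== LEMMAS AND PROOFS =====

-- Python's tuple sort is the sort by the lexicographic key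
lemma pv_sorted2_eq_sorted_lex (xs : List (Int × String)) :
    PySem.List.sorted2 xs Prod.fst Prod.snd false
      = PySem.List.sorted xs (fun p => toLex p) false := by
  have h : (fun (a b : Int × String) => decide (a.1 < b.1) || (!decide (b.1 < a.1) && decide (a.2 < b.2)))
      = (fun (a b : Int × String) => decide ((toLex a : Lex (Int × String)) < toLex b)) := by
    funext a b
    by_cases h1 : a.1 < b.1 <;> by_cases h2 : b.1 < a.1 <;> by_cases h3 : a.2 < b.2 <;>
      simp [Prod.Lex.lt_iff, h1, h2, h3] <;> omega
  simp only [PySem.List.sorted2, PySem.List.sorted, Bool.false_eq_true, if_false, h]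

-- proof-side mirror of the classifying fold: the keyed list it produces …
def pvCore (s : PySem.Set String) : List String → List (Int × String)
  | [] => []
  | f :: xs =>
    if priorityFields.contains f then
      if PySem.Set.contains s f then pvCore s xs
      else (pvRankOf f, f) :: pvCore (PySem.Set.add s f) xs
    else if PySem.Str.startswith f "judge_" then
      (PySem.List.len priorityFields + 1, f) :: pvCore s xs
    else (PySem.List.len priorityFields, f) :: pvCore s xs

-- … and the seen-set it maintains
def pvSeen (s : PySem.Set String) : List String → PySem.Set String
  | [] => s
  | f :: xs =>
    if priorityFields.contains f then
      if PySem.Set.contains s f then pvSeen s xs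
      else pvSeen (PySem.Set.add s f) xs
    else pvSeen s xs

-- the priority fields picked up by the pass: first occurrences not already in s
def pvPrio (s : PySem.Set String) : List String → List String
  | [] => []
  | f :: xs =>
    if priorityFields.contains f then
      if PySem.Set.contains s f then pvPrio s xs
      else f :: pvPrio (PySem.Set.add s f) xs
    else pvPrio s xs

lemma pv_fold_spec (xs : List String) (acc : List (Int × String)) (s : PySem.Set String) :
    xs.foldl pvDecorStep (acc, s) = (acc ++ pvCore s xs, pvSeen s xs) := by
  induction xs generalizing acc s with
  | nil => simp [pvCore, pvSeen]
  | cons f xs ih =>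
    simp only [List.foldl_cons, pvDecorStep, pvCore, pvSeen]
    split_ifs with h1 h2 h3 <;> simp [ih]

lemma prio_not_judge : ∀ f ∈ priorityFields, PySem.Str.startswith f "judge_" = false := by decide

lemma prio_rank_lt : ∀ f ∈ priorityFields, pvRankOf f < (priorityFields.length : Int) := by decide

lemma prio_rank_pairwise : priorityFields.Pairwise (fun a b => pvRankOf a < pvRankOf b) := by decide

lemma perm_cons_mid {α : Type} (x : α) (A B C : List α) :
    (x :: (A ++ (B ++ C))).Perm (A ++ ((x :: B) ++ C)) := by
  have h : A ++ ((x :: B) ++ C) = A ++ x :: (B ++ C) := by simp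
  rw [h]; exact List.perm_middle.symm

lemma perm_cons_last {α : Type} (x : α) (A B C : List α) :
    (x :: (A ++ (B ++ C))).Perm (A ++ (B ++ x :: C)) := by
  have h1 : x :: (A ++ (B ++ C)) = x :: ((A ++ B) ++ C) := by simp
  have h2 : A ++ (B ++ x :: C) = (A ++ B) ++ x :: C := by simp
  rw [h1, h2]; exact List.perm_middle.symm

lemma pv_core_perm (xs : List String) (s : PySem.Set String) :
    (pvCore s xs).Perm
      ((pvPrio s xs).map (fun f => (pvRankOf f, f))
        ++ ((xs.filter (fun f => !(priorityFields.contains f) && !(PySem.Str.startswith f "judge_"))).map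
              (fun f => ((PySem.List.len priorityFields : Int), f))
        ++ ((xs.filter (fun f => PySem.Str.startswith f "judge_")).map
              (fun f => (PySem.List.len priorityFields + 1, f))))) := by
  induction xs generalizing s with
  | nil => simp [pvCore, pvPrio]
  | cons f xs ih =>
    by_cases hp : f ∈ priorityFields
    · have hnj : PySem.Chars.startswith f.toList ['j','u','d','g','e','_'] = false := by
        have := prio_not_judge f hp
        simpa [PySem.Str.startswith] using this
      by_cases hs : f ∈ s
      · simpa [pvCore, pvPrio, hp, hs, List.filter_cons, hnj] using ih s
      · simpa [pvCore, pvPrio, hp, hs, List.filter_cons, hnj] using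
          ((ih (PySem.Set.add s f)).cons ((pvRankOf f, f)))
    · by_cases hj : PySem.Chars.startswith f.toList ['j','u','d','g','e','_']
      · simpa [pvCore, pvPrio, hp, hj, List.filter_cons] using
          ((ih s).cons _).trans (perm_cons_last _ _ _ _)
      · simpa [pvCore, pvPrio, hp, hj, List.filter_cons] using
          ((ih s).cons _).trans (perm_cons_mid _ _ _ _)

lemma mem_pvPrio (xs : List String) (s : PySem.Set String) (g : String) :
    g ∈ pvPrio s xs ↔ g ∈ priorityFields ∧ g ∈ xs ∧ g ∉ s := by
  induction xs generalizing s with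
  | nil => simp [pvPrio]
  | cons f xs ih =>
    by_cases hp : f ∈ priorityFields
    · by_cases hs : f ∈ s
      · simp [pvPrio, hp, hs, ih]
        rintro _ hgs rfl
        exact absurd hs hgs
      · simp [pvPrio, hp, hs, ih]
        constructor
        · rintro (rfl | ⟨h1, h2, h3, h4⟩)
          · exact ⟨hp, Or.inl rfl, hs⟩
          · exact ⟨h1, Or.inr h2, h3⟩
        · rintro ⟨h1, h2, h3⟩
          by_cases hgf : g = f
          · exact Or.inl hgf
          · rcases h2 with rfl | h2
            · exact absurd rfl hgf
            · exact Or.inr ⟨h1, h2, h3, hgf⟩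
    · simp [pvPrio, hp, ih]
      intro hg _ rfl
      exact absurd hg hp

lemma nodup_pvPrio (xs : List String) (s : PySem.Set String) : (pvPrio s xs).Nodup := by
  induction xs generalizing s with
  | nil => simp [pvPrio]
  | cons f xs ih =>
    by_cases hp : f ∈ priorityFields
    · by_cases hs : f ∈ s
      · simpa [pvPrio, hp, hs] using ih s
      · simp only [pvPrio]
        simp only [List.contains_eq_mem, hp, decide_true, if_true]
        have hs' : PySem.Set.contains s f = false := by
          simp [PySem.Set.contains_eq_listContains, List.contains_eq_mem, hs]
        simp only [hs', Bool.false_eq_true, if_false, List.nodup_cons]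
        refine ⟨fun hm => ?_, ih _⟩
        have := (mem_pvPrio xs (PySem.Set.add s f) f).mp hm
        exact this.2.2 ((PySem.Set.mem_add s f f).mpr (Or.inr rfl))
    · simpa [pvPrio, hp] using ih s

lemma pvPrio_perm_filter (fieldnames : List String) :
    (pvPrio (PySem.Set.ofList []) fieldnames).Perm
      (priorityFields.filter (fun f => PySem.Set.contains (PySem.Set.ofList fieldnames) f)) := by
  have hnd : priorityFields.Nodup := by decide
  rw [List.perm_ext_iff_of_nodup (nodup_pvPrio _ _) (hnd.filter _)]
  intro g
  simp [mem_pvPrio, PySem.Set.mem_ofList, PySem.Set.contains_eq_listContains,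
    List.contains_eq_mem]

lemma pv_main_eq (fieldnames : List String) :
    order_fieldnames_py fieldnames = order_fieldnames_py_alt fieldnames := by
  unfold order_fieldnames_py order_fieldnames_py_alt
  simp only []
  set O := fieldnames.filter
    (fun f => !(priorityFields.contains f) && !(PySem.Str.startswith f "judge_")) with hO
  set J := fieldnames.filter (fun f => PySem.Str.startswith f "judge_") with hJ
  set P := priorityFields.filter
    (fun f => PySem.Set.contains (PySem.Set.ofList fieldnames) f) with hP
  have hkeyed : (fieldnames.foldl pvDecorStep ([], PySem.Set.ofList [])).1
      = pvCore (PySem.Set.ofList []) fieldnames := by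
    rw [pv_fold_spec]; simp
  set pk : String → Int × String := fun f => (pvRankOf f, f) with hpk
  set mk : String → Int × String := fun f => ((priorityFields.length : Int), f) with hmk
  set jk : String → Int × String := fun f => ((priorityFields.length : Int) + 1, f) with hjk
  set ys : List (Int × String) :=
    P.map pk ++ ((PySem.List.sorted O (fun x => x) false).map mk
      ++ (PySem.List.sorted J (fun x => x) false).map jk) with hys
  have hperm : (PySem.List.sorted ((fieldnames.foldl pvDecorStep ([], PySem.Set.ofList [])).1)
      (fun p => toLex p) false).Perm ys := by
    refine (PySem.List.sorted_perm _ _ _).trans ?_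
    rw [hkeyed]
    refine (pv_core_perm fieldnames (PySem.Set.ofList [])).trans ?_
    refine List.Perm.append ((pvPrio_perm_filter fieldnames).map pk) ?_
    exact List.Perm.append (((PySem.List.sorted_perm O (fun x => x) false).map mk).symm)
      (((PySem.List.sorted_perm J (fun x => x) false).map jk).symm)
  have hpair : List.Pairwise (fun a b : Int × String =>
      (toLex a : Lex (Int × String)) ≤ toLex b) ys := by
    rw [hys, List.pairwise_append]
    refine ⟨?_, ?_, ?_⟩
    · rw [List.pairwise_map]
      refine List.Pairwise.imp ?_ (prio_rank_pairwise.filter _)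
      intro a b hab
      rw [Prod.Lex.le_iff]; left; simpa using hab
    · rw [List.pairwise_append]
      refine ⟨?_, ?_, ?_⟩
      · rw [List.pairwise_map]
        refine List.Pairwise.imp ?_ (PySem.List.sorted_pairwise O (fun x => x))
        intro a b hab
        rw [Prod.Lex.le_iff]; right
        exact ⟨rfl, by simpa using hab⟩
      · rw [List.pairwise_map]
        refine List.Pairwise.imp ?_ (PySem.List.sorted_pairwise J (fun x => x))
        intro a b hab
        rw [Prod.Lex.le_iff]; right
        exact ⟨rfl, by simpa using hab⟩
      · intro a ha b hb
        obtain ⟨f, -, rfl⟩ := List.mem_map.mp ha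
        obtain ⟨g, -, rfl⟩ := List.mem_map.mp hb
        rw [Prod.Lex.le_iff]; left; simp [hmk, hjk]
    · intro a ha b hb
      obtain ⟨f, hf, rfl⟩ := List.mem_map.mp ha
      have hfp : f ∈ priorityFields := (List.mem_filter.mp hf).1
      have hlt : pvRankOf f < (priorityFields.length : Int) := prio_rank_lt f hfp
      rcases List.mem_append.mp hb with hb | hb
      · obtain ⟨g, -, rfl⟩ := List.mem_map.mp hb
        rw [Prod.Lex.le_iff]; left; simpa [hpk, hmk] using hlt
      · obtain ⟨g, -, rfl⟩ := List.mem_map.mp hb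
        rw [Prod.Lex.le_iff]; left
        show pvRankOf f < (priorityFields.length : Int) + 1
        omega
  have heq : PySem.List.sorted ((fieldnames.foldl pvDecorStep ([], PySem.Set.ofList [])).1)
      (fun p => toLex p) false = ys :=
    PySem.List.eq_of_perm_of_pairwise_le_of_injective (fun p => toLex p)
      (fun a b h => by simpa using congrArg ofLex h) hperm
      (PySem.List.sorted_pairwise _ _) hpair
  rw [pv_sorted2_eq_sorted_lex, heq, hys]
  simp [hpk, hmk, hjk, Function.comp_def]

-- ===== VERDICT (by name: the statement is the Claim_ definition above) =====
theorem order_fieldnames_py_spec : Claim_equal_order_fieldnames_py := by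
  intro fieldnames _
  unfold Spec_order_fieldnames_py
  exact pv_main_eq fieldnames
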